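-- pv_equiv track=rewrite | github.com/maliqadri05/Virtual-Assistant-For-Medicine-FYP | MedAI_Optimized.py | _extract_question
-- ===== SOURCE A (Python) =====
-- def _extract_question(text: str) -> str:
--     """Extract clean question from model output"""
--     # Remove "Question:" prefix if present
--     if "Question:" in text:
--         text = text.split("Question:")[-1].strip()
--
--     # Find first sentence with question mark
--     sentences = text.split('.')
--     for sent in sentences:
--         if '?' in sent:
--             question = sent[:sent.index('?')+1].strip()
--             return question.strip('"\'')
--
--     # Fallback: take first line
--     lines = [l.strip() for l in text.split('\n') if l.strip()]
--     if lines: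
--         question = lines[0].strip('"\'')
--         if not question.endswith('?'):
--             question += '?'
--         return question
--
--     return "Can you tell me more?"
-- ===== SOURCE B (Python) =====
-- def _extract_question(text: str) -> str:
--     """Extract clean question from model output (single left-to-right scan)."""
--     if "Question:" in text:
--         text = text.split("Question:")[-1].strip()
--
--     # One pass: keep the characters of the current '.'-delimited segment;
--     # the first '?' ends the question.
--     buf = []
--     for ch in text:
--         if ch == '?':
--             return ''.join(buf + ['?']).strip().strip('"\'')
--         if ch == '.':
--             buf = []
--         else:
--             buf.append(ch)
--
--     # Fallback: take first line
--     lines = [l.strip() for l in text.split('\n') if l.strip()]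
--     if lines:
--         question = lines[0].strip('"\'')
--         if not question.endswith('?'):
--             question += '?'
--         return question
--
--     return "Can you tell me more?"
-- ===== Notes on version B (the rewrite author's own statement) =====
-- stated objective: alternative
-- what changed: A builds the full list of '.'-separated sentences and loops over it searching each for '?'; B makes a single left-to-right character scan that keeps only the current sentence buffer and stops at the first '?'.
import Mathlib
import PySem

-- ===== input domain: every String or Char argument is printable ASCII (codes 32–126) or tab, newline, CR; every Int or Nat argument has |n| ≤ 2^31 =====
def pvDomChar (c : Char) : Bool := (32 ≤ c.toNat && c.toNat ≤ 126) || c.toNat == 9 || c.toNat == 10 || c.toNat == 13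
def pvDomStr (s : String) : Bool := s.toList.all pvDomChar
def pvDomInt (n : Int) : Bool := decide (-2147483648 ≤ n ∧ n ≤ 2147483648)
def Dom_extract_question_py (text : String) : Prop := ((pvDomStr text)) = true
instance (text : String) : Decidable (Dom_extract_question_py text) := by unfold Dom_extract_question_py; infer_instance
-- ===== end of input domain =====

-- B replaces A's split('.')-list-and-loop by a single left-to-right character scan (objective: alternative, same cost).

-- ===== PORT A =====
-- helpers shared by both ports: these Python lines are textually identical in A and B
-- ('Question:' prefix strip and the first-line fallback).
def pvPrefixStrip (text : String) : String :=
  if PySem.Str.isIn "Question:" text then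
    -- text.split("Question:")[-1].strip(); sep ≠ "" so split? = some, and [-1] = getLast! (split result is nonempty)
    PySem.Str.strip (((PySem.Str.split? text "Question:").getD []).getLast!)
  else text

def pvFallback (text : String) : String :=
  -- lines = [l.strip() for l in text.split('\n') if l.strip()]
  let lines := (((PySem.Str.split? text "\n").getD []).filter
      (fun l => PySem.Str.strip l != "")).map PySem.Str.strip
  match lines with
  | [] => "Can you tell me more?"
  | l :: _ =>
    let question := PySem.Str.stripChars l "\"'"
    if PySem.Str.endswith question "?" then question else question ++ "?"

def pvSentLoop : List String → Option String
  | [] => none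
  | sent :: rest =>
    if PySem.Str.isIn "?" sent then
      -- sent.index('?') = Str.find sent "?", exact because '?' ∈ sent in this branch
      some (PySem.Str.stripChars
        (PySem.Str.strip (PySem.Str.slice sent none (some (PySem.Str.find sent "?" + 1)))) "\"'")
    else pvSentLoop rest

def extract_question_py (text : String) : String :=
  let t := pvPrefixStrip text
  match pvSentLoop ((PySem.Str.split? t ".").getD []) with
  | some q => q
  | none => pvFallback t

-- ===== PORT B =====
def pvScan : List Char → List Char → Option String
  | _, [] => none
  | buf, c :: rest =>
    if c = '?' then
      some (PySem.Str.stripChars (PySem.Str.strip (String.ofList (buf ++ ['?']))) "\"'")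
    else if c = '.' then pvScan [] rest
    else pvScan (buf ++ [c]) rest

def extract_question_py_alt (text : String) : String :=
  let t := pvPrefixStrip text
  match pvScan [] t.toList with
  | some q => q
  | none => pvFallback t

-- ===== PRECONDITION & SPEC =====
def Spec_extract_question_py (text : String) (out : String) : Prop := out = extract_question_py_alt text
instance (text : String) (out : String) : Decidable (Spec_extract_question_py text out) := by unfold Spec_extract_question_py; infer_instance

-- ===== CLAIM (what is proved, stated in full; the proofs are below) =====
def Claim_equal_extract_question_py : Prop := ∀ (text : String), Dom_extract_question_py text → Spec_extract_question_py text (extract_question_py text)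

-- ===== LEMMAS AND PROOFS =====

-- Chars-level mirrors of the two loops
def pvCharLoop : List (List Char) → Option (List Char)
  | [] => none
  | s :: rest =>
    if PySem.Chars.isIn ['?'] s then
      some (PySem.Chars.stripChars
        (PySem.Chars.strip (PySem.Chars.slice s none (some (PySem.Chars.find s ['?'] + 1)))) ['"', '\''])
    else pvCharLoop rest

def pvCharScan : List Char → List Char → Option (List Char)
  | _, [] => none
  | buf, c :: rest =>
    if c = '?' then some (PySem.Chars.stripChars (PySem.Chars.strip (buf ++ ['?'])) ['"', '\''])
    else if c = '.' then pvCharScan [] rest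
    else pvCharScan (buf ++ [c]) rest

theorem pvSentLoop_eq (ss : List String) :
    pvSentLoop ss = (pvCharLoop (ss.map String.toList)).map String.ofList := by
  induction ss with
  | nil => rfl
  | cons s rest ih =>
    have hq : ("?" : String).toList = ['?'] := rfl
    simp only [pvSentLoop, pvCharLoop, List.map_cons, PySem.Str.isIn_eq, hq]
    by_cases h : PySem.Chars.isIn ['?'] s.toList = true
    · simp only [h, if_pos]
      have h2 : (PySem.Str.stripChars
        (PySem.Str.strip (PySem.Str.slice s none (some (PySem.Str.find s "?" + 1)))) "\"'").toList =
        PySem.Chars.stripChars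
        (PySem.Chars.strip (PySem.Chars.slice s.toList none (some (PySem.Chars.find s.toList ['?'] + 1)))) ['"', '\''] := by
        simp [hq, show ("\"'" : String).toList = ['"', '\''] from rfl]
      rw [Option.map_some, ← h2, String.ofList_toList]
    · simp only [Bool.not_eq_true] at h
      simp [h, ih]

theorem pvScan_eq (l buf : List Char) :
    pvScan buf l = (pvCharScan buf l).map String.ofList := by
  induction l generalizing buf with
  | nil => rfl
  | cons c rest ih =>
    simp only [pvScan, pvCharScan]
    split_ifs with h1 h2
    · have h2 : (PySem.Str.stripChars (PySem.Str.strip (String.ofList (buf ++ ['?']))) "\"'").toList =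
        PySem.Chars.stripChars (PySem.Chars.strip (buf ++ ['?'])) ['"', '\''] := by
        simp [show ("\"'" : String).toList = ['"', '\''] from rfl]
      rw [Option.map_some, ← h2, String.ofList_toList]
    · exact ih []
    · exact ih (buf ++ [c])

theorem pv_splitOn_go (fuel : ℕ) (l cur : List Char) (acc : List (List Char)) (h : l.length ≤ fuel) :
    PySem.Chars.splitOn.go ['.'] fuel l cur acc =
      acc.reverse ++ (List.splitOnP (· == '.') l).modifyHead (cur.reverse ++ ·) := by
  induction fuel generalizing l cur acc with
  | zero =>
    have : l = [] := List.length_eq_zero_iff.mp (Nat.le_zero.mp h)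
    subst this
    simp [PySem.Chars.splitOn.go, List.splitOnP_nil]
  | succ fuel ih =>
    cases l with
    | nil => simp [PySem.Chars.splitOn.go, List.splitOnP_nil]
    | cons c rest =>
      rw [PySem.Chars.splitOn.go]
      have hpre : List.isPrefixOf ['.'] (c :: rest) = (c == '.') := by
        simp [List.isPrefixOf, eq_comm]
      simp only [hpre]
      by_cases hc : c = '.'
      · simp only [hc, beq_self_eq_true, if_pos, List.splitOnP_cons]
        have hd : List.drop (['.'] : List Char).length ('.' :: rest) = rest := by simp
        rw [hd, ih rest [] (List.reverse cur :: acc) (by simpa using Nat.le_of_succ_le_succ (by simpa using h))]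
        simp [List.modifyHead]
        cases hsp : List.splitOnP (· == '.') rest with
        | nil => exact absurd hsp (List.splitOnP_ne_nil _ _)
        | cons a b => simp
      · have hcb : (c == '.') = false := by simp [hc]
        simp only [hcb, if_neg, Bool.false_eq_true, not_false_iff]
        rw [ih rest (c :: cur) acc (by simpa using Nat.le_of_succ_le_succ (by simpa using h))]
        rw [List.splitOnP_cons]
        simp only [hcb, Bool.false_eq_true, if_neg, not_false_iff, List.modifyHead_modifyHead]
        congr 1
        cases hsp : List.splitOnP (· == '.') rest with
        | nil => exact absurd hsp (List.splitOnP_ne_nil _ _)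
        | cons a b => simp

theorem pv_splitOn_eq (l : List Char) :
    PySem.Chars.splitOn l ['.'] = List.splitOnP (· == '.') l := by
  rw [PySem.Chars.splitOn, pv_splitOn_go _ _ _ _ (Nat.le_succ _)]
  cases hsp : List.splitOnP (· == '.') l with
  | nil => exact absurd hsp (List.splitOnP_ne_nil _ _)
  | cons a b => simp

theorem pv_find_go (buf h : List Char) (k : ℕ) (hb : '?' ∉ buf) :
    PySem.Chars.find.go ['?'] (buf ++ '?' :: h) k = (k : ℤ) + buf.length := by
  induction buf generalizing k with
  | nil =>
    rw [List.nil_append, PySem.Chars.find.go]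
    simp [List.isPrefixOf]
  | cons c buf ih =>
    have hc : c ≠ '?' := fun hh => hb (hh ▸ List.mem_cons_self)
    rw [List.cons_append, PySem.Chars.find.go]
    have hpre : List.isPrefixOf ['?'] (c :: (buf ++ '?' :: h)) = false := by
      simp only [List.isPrefixOf, Bool.and_true, beq_eq_false_iff_ne, ne_eq]
      exact fun hh => hc hh.symm
    simp only [hpre, Bool.false_eq_true, if_neg, not_false_iff]
    rw [ih (k + 1) (fun hm => hb (List.mem_cons_of_mem _ hm))]
    push_cast [List.length_cons]
    ring

theorem pv_find_full (buf h : List Char) (hb : '?' ∉ buf) :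
    PySem.Chars.find (buf ++ '?' :: h) ['?'] = (buf.length : ℤ) := by
  rw [PySem.Chars.find, pv_find_go _ _ _ hb]; simp

theorem pv_isIn_true (buf h : List Char) (hb : '?' ∉ buf) :
    PySem.Chars.isIn ['?'] (buf ++ '?' :: h) = true := by
  rw [PySem.Chars.isIn, pv_find_full _ _ hb]
  simp

theorem pv_isIn_false (buf : List Char) (hb : '?' ∉ buf) :
    PySem.Chars.isIn ['?'] buf = false := by
  rw [PySem.Chars.isIn_eq_false_iff]
  intro hinf
  exact hb (List.singleton_sublist.mp hinf.sublist)

theorem pv_slice_take (buf h : List Char) (hb : '?' ∉ buf) :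
    PySem.Chars.slice (buf ++ '?' :: h) none (some (PySem.Chars.find (buf ++ '?' :: h) ['?'] + 1)) =
      buf ++ ['?'] := by
  rw [pv_find_full _ _ hb, PySem.Chars.slice]
  rw [PySem.List.slice_to (hb := by positivity)]
  have : ((buf.length : ℤ) + 1).toNat = buf.length + 1 := by omega
  rw [this, List.take_append]
  simp

theorem pv_main (t buf : List Char) (hdot : '.' ∉ buf) (hq : '?' ∉ buf) :
    pvCharLoop ((List.splitOnP (· == '.') t).modifyHead (buf ++ ·)) = pvCharScan buf t := by
  induction t generalizing buf with
  | nil =>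
    simp only [List.splitOnP_nil, List.modifyHead, List.append_nil, pvCharLoop, pvCharScan,
      pv_isIn_false buf hq, Bool.false_eq_true, if_neg, not_false_iff]
  | cons c rest ih =>
    by_cases hc : c = '?'
    · subst hc
      rw [List.splitOnP_cons]
      have hcb : (('?' : Char) == '.') = false := rfl
      simp only [hcb, Bool.false_eq_true, if_neg, not_false_iff]
      obtain ⟨hd, tl, hsp⟩ : ∃ hd tl, List.splitOnP (· == '.') rest = hd :: tl := by
        cases hsp : List.splitOnP (· == '.') rest with
        | nil => exact absurd hsp (List.splitOnP_ne_nil _ _)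
        | cons a b => exact ⟨a, b, rfl⟩
      rw [hsp]
      simp only [List.modifyHead_cons, pvCharLoop, pvCharScan]
      rw [pv_isIn_true buf hd hq, if_pos rfl, pv_slice_take buf hd hq]
      simp
    · by_cases hc2 : c = '.'
      · subst hc2
        rw [List.splitOnP_cons]
        simp only [beq_self_eq_true, if_pos, List.modifyHead_cons, List.append_nil]
        simp only [pvCharLoop, pvCharScan, pv_isIn_false buf hq, Bool.false_eq_true, if_neg,
          not_false_iff]
        have hid : (fun x => ([] : List Char) ++ x) = id := funext fun x => rfl
        have := ih [] (List.not_mem_nil) (List.not_mem_nil)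
        rw [hid, List.modifyHead_id, id_eq] at this
        simp only [hc, if_neg, not_false_iff]
        exact this
      · rw [List.splitOnP_cons]
        have hcb : (c == '.') = false := by simp [hc2]
        simp only [hcb, Bool.false_eq_true, if_neg, not_false_iff, List.modifyHead_modifyHead]
        have hfun : ((fun x => buf ++ x) ∘ (List.cons c)) = (fun x => (buf ++ [c]) ++ x) := by
          funext x; simp
        rw [hfun]
        have hdot' : '.' ∉ buf ++ [c] := by
          simp only [List.mem_append, List.mem_singleton, not_or]
          exact ⟨hdot, fun h => hc2 h.symm⟩
        have hq' : '?' ∉ buf ++ [c] := by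
          simp only [List.mem_append, List.mem_singleton, not_or]
          exact ⟨hq, fun h => hc h.symm⟩
        rw [ih (buf ++ [c]) hdot' hq']
        simp [pvCharScan, hc, hc2]

theorem pv_ports_eq (text : String) : extract_question_py text = extract_question_py_alt text := by
  have hdot : ("." : String).toList = ['.'] := rfl
  have hmain : ∀ t : String, pvSentLoop ((PySem.Str.split? t ".").getD []) = pvScan [] t.toList := by
    intro t
    cases hs : PySem.Str.split? t "." with
    | none =>
      exfalso
      have := PySem.Str.split?_map t "."
      rw [hs] at this
      simp [PySem.Chars.split?, hdot] at this
    | some ss =>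
      have hmap := PySem.Str.split?_map t "."
      rw [hs, hdot] at hmap
      simp only [Option.map_some, PySem.Chars.split?, List.isEmpty_cons, Bool.false_eq_true,
        if_neg, not_false_iff] at hmap
      have hss : ss.map String.toList = PySem.Chars.splitOn t.toList ['.'] := by
        simpa using hmap
      rw [Option.getD_some, pvSentLoop_eq, hss, pv_splitOn_eq]
      have hid : (fun x => ([] : List Char) ++ x) = id := funext fun x => rfl
      have hm := pv_main t.toList [] (List.not_mem_nil) (List.not_mem_nil)
      rw [hid, List.modifyHead_id, id_eq] at hm
      rw [hm, ← pvScan_eq]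
  unfold extract_question_py extract_question_py_alt
  simp only [hmain]

-- ===== VERDICT (by name: the statement is the Claim_ definition above) =====
theorem extract_question_py_spec : Claim_equal_extract_question_py := by
  intro text _
  unfold Spec_extract_question_py
  exact pv_ports_eq text
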